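-- pv_equiv track=rewrite | github.com/elastic/ecs | .github/scripts/ecs_release/changelog.py | _remove_empty_sections
-- ===== SOURCE A (Python) =====
-- def _has_bullet_entries(lines: list[str]) -> bool:
--     """Return True if any line in *lines* is a ``*`` bullet entry."""
--     return any(line.strip().startswith("*") for line in lines)
--
-- def _remove_empty_sections(text: str) -> str:
--     """Remove ``###`` / ``####`` sections that contain no bullet entries.
--
--     Parses the markdown into (heading, body) pairs, then reassembles
--     only those sections whose body contains at least one ``*`` entry.
--     ``##`` headings are always preserved.
--     """
--     sections: list[tuple[str, list[str]]] = []
--     current_heading: str | None = None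
--     current_body: list[str] = []
--
--     for line in text.split("\n"):
--         if line.startswith("## ") or line.startswith("### ") or line.startswith("#### "):
--             if current_heading is not None or current_body:
--                 sections.append((current_heading or "", current_body))
--             current_heading = line
--             current_body = []
--         else:
--             current_body.append(line)
--
--     sections.append((current_heading or "", current_body))
--
--     result: list[str] = []
--     # Track whether the parent ### had any kept #### children so we
--     # can suppress empty ### groups too.
--     pending_h3: str | None = None
--     h3_has_content = False
--
--     for heading, body in sections:
--         if heading.startswith("## ") and not heading.startswith("### "):
--             # Flush pending ### if it had content
--             if pending_h3 and h3_has_content: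
--                 result.append(pending_h3)
--             pending_h3 = None
--             h3_has_content = False
--             result.append(heading)
--             result.extend(body)
--         elif heading.startswith("### "):
--             if pending_h3 and h3_has_content:
--                 result.append(pending_h3)
--             pending_h3 = heading
--             h3_has_content = False
--         elif heading.startswith("#### "):
--             if _has_bullet_entries(body):
--                 h3_has_content = True
--                 result.append(heading)
--                 result.extend(body)
--         elif not heading:
--             result.extend(body)
--
--     if pending_h3 and h3_has_content:
--         result.append(pending_h3)
--
--     return "\n".join(result)
-- ===== SOURCE B (Python) =====
-- def _bullets(lines):
--     return any(l.strip().startswith("*") for l in lines)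
--
-- def _remove_empty_sections(text: str) -> str:
--     """Single streaming pass: a small state machine over the lines, no
--     intermediate sections list and no second scan."""
--     out: list[str] = []
--     pending_h3: str | None = None
--     h3_has_content = False
--     mode = "emit"          # "emit" | "drop" | "h4"
--     h4_heading = ""
--     h4_body: list[str] = []
--
--     def close_h4():
--         nonlocal h3_has_content, mode
--         if mode == "h4":
--             if _bullets(h4_body):
--                 h3_has_content = True
--                 out.append(h4_heading)
--                 out.extend(h4_body)
--         mode = "drop"
--
--     for line in text.split("\n"):
--         if line.startswith("## "):
--             close_h4()
--             if pending_h3 and h3_has_content: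
--                 out.append(pending_h3)
--             pending_h3 = None
--             h3_has_content = False
--             out.append(line)
--             mode = "emit"
--         elif line.startswith("### "):
--             close_h4()
--             if pending_h3 and h3_has_content:
--                 out.append(pending_h3)
--             pending_h3 = line
--             h3_has_content = False
--             mode = "drop"
--         elif line.startswith("#### "):
--             close_h4()
--             h4_heading = line
--             h4_body = []
--             mode = "h4"
--         elif mode == "emit":
--             out.append(line)
--         elif mode == "h4":
--             h4_body.append(line)
--         # mode == "drop": line discarded (body directly under a ###)
--
--     close_h4()
--     if pending_h3 and h3_has_content:
--         out.append(pending_h3)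
--     return "\n".join(out)
-- ===== Notes on version B (the rewrite author's own statement) =====
-- stated objective: alternative
-- what changed: Replaced A's two phases (parse all lines into a (heading, body) sections list, then re-scan that list to rebuild the text) by a single streaming pass over the lines that maintains a small state machine (output list, pending ### heading with content flag, and an emit/drop/buffer mode holding the current #### body).
import Mathlib
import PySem

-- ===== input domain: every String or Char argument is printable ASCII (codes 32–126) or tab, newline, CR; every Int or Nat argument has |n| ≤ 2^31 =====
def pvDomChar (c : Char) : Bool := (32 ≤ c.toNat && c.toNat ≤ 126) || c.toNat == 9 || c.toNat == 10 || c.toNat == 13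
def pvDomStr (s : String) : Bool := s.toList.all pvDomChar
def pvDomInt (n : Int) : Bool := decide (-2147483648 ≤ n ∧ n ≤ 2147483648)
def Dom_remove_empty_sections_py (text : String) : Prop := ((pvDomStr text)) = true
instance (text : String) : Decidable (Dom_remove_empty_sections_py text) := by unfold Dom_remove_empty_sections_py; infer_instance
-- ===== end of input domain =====

-- B replaces A's two passes (build a sections list, then re-scan it) by one streaming
-- state-machine pass over the lines; objective: simpler/alternative, same output.

-- shared tiny helpers (Python truthiness of an Optional[str], the pending-### flush,
-- and the bullet test `_has_bullet_entries`)
def pvTruthy (p : Option String) : Bool :=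
  match p with
  | some s => s != ""
  | none => false

def pvFlush (res : List String) (p : Option String) (h3 : Bool) : List String :=
  if pvTruthy p && h3 then res ++ [p.getD ""] else res

def pvHasBullet (lines : List String) : Bool :=
  lines.any fun l => PySem.Str.startswith (PySem.Str.strip l) "*"

-- text.split("\n"); exact: PySem.Chars.splitOn is Python's str.split with a non-empty separator
def pvLines (s : String) : List String :=
  (PySem.Chars.splitOn s.toList ['\n']).map String.ofList

-- ===== PORT A ===== (two passes: parse into (heading, body) sections, then re-scan)
def pvP1Step (st : List (String × List String) × Option String × List String)
    (line : String) : List (String × List String) × Option String × List String :=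
  let (secs, ch, cb) := st
  if PySem.Str.startswith line "## " || PySem.Str.startswith line "### "
      || PySem.Str.startswith line "#### " then
    if ch.isSome || !cb.isEmpty then (secs ++ [(ch.getD "", cb)], some line, [])
    else (secs, some line, [])
  else (secs, ch, cb ++ [line])

def pvP2Step (st : List String × Option String × Bool)
    (sec : String × List String) : List String × Option String × Bool :=
  let (res, pending, h3) := st
  let (heading, body) := sec
  if PySem.Str.startswith heading "## " && !PySem.Str.startswith heading "### " then
    (pvFlush res pending h3 ++ [heading] ++ body, none, false)
  else if PySem.Str.startswith heading "### " then
    (pvFlush res pending h3, some heading, false)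
  else if PySem.Str.startswith heading "#### " then
    (if pvHasBullet body then (res ++ [heading] ++ body, pending, true) else (res, pending, h3))
  else if heading == "" then (res ++ body, pending, h3)
  else (res, pending, h3)

def remove_empty_sections_py (text : String) : String :=
  let p1 := (pvLines text).foldl pvP1Step ([], none, [])
  let sections := p1.1 ++ [(p1.2.1.getD "", p1.2.2)]
  let p2 := sections.foldl pvP2Step ([], none, false)
  PySem.Str.join "\n" (pvFlush p2.1 p2.2.1 p2.2.2)

-- ===== PORT B ===== (single streaming pass; mode = emit | drop | h4(buffer))
inductive PVMode where
  | emit : PVMode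
  | drop : PVMode
  | h4 : String → List String → PVMode
deriving Repr

structure PVSt where
  out : List String
  pending : Option String
  h3 : Bool
  mode : PVMode
deriving Repr

def pvCloseH4 (st : PVSt) : PVSt :=
  match st.mode with
  | .h4 h b =>
    if pvHasBullet b then ⟨st.out ++ [h] ++ b, st.pending, true, .drop⟩
    else ⟨st.out, st.pending, st.h3, .drop⟩
  | _ => { st with mode := .drop }

def pvBStep (st : PVSt) (line : String) : PVSt :=
  if PySem.Str.startswith line "## " then
    let st := pvCloseH4 st
    ⟨pvFlush st.out st.pending st.h3 ++ [line], none, false, .emit⟩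
  else if PySem.Str.startswith line "### " then
    let st := pvCloseH4 st
    ⟨pvFlush st.out st.pending st.h3, some line, false, .drop⟩
  else if PySem.Str.startswith line "#### " then
    let st := pvCloseH4 st
    ⟨st.out, st.pending, st.h3, .h4 line []⟩
  else
    match st.mode with
    | .emit => { st with out := st.out ++ [line] }
    | .drop => st
    | .h4 h b => { st with mode := .h4 h (b ++ [line]) }

def remove_empty_sections_py_alt (text : String) : String :=
  let st := pvCloseH4 ((pvLines text).foldl pvBStep ⟨[], none, false, .emit⟩)
  PySem.Str.join "\n" (pvFlush st.out st.pending st.h3)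

-- ===== PRECONDITION & SPEC =====
def Spec_remove_empty_sections_py (text : String) (out : String) : Prop := out = remove_empty_sections_py_alt text
instance (text : String) (out : String) : Decidable (Spec_remove_empty_sections_py text out) := by unfold Spec_remove_empty_sections_py; infer_instance

-- ===== CLAIM (what is proved, stated in full; the proofs are below) =====
def Claim_equal_remove_empty_sections_py : Prop := ∀ (text : String), Dom_remove_empty_sections_py text → Spec_remove_empty_sections_py text (remove_empty_sections_py text)

-- ===== LEMMAS AND PROOFS =====

-- recursive form of A's first pass (sections list, with the unconditional final append)
def pvSections : List String → Option String → List String → List (String × List String)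
  | [], h, b => [(h.getD "", b)]
  | l :: ls, h, b =>
    if PySem.Str.startswith l "## " || PySem.Str.startswith l "### "
        || PySem.Str.startswith l "#### " then
      (if h.isSome || !b.isEmpty then [(h.getD "", b)] else []) ++ pvSections ls (some l) []
    else pvSections ls h (b ++ [l])

-- B's state corresponding to A mid-parse: open section (h, b) and phase-2 state st2
def pvCorr (h : Option String) (b : List String)
    (st2 : List String × Option String × Bool) : PVSt :=
  match h with
  | none => ⟨st2.1 ++ b, st2.2.1, st2.2.2, .emit⟩
  | some l =>
    if PySem.Str.startswith l "## " then
      ⟨pvFlush st2.1 st2.2.1 st2.2.2 ++ [l] ++ b, none, false, .emit⟩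
    else if PySem.Str.startswith l "### " then
      ⟨pvFlush st2.1 st2.2.1 st2.2.2, some l, false, .drop⟩
    else if PySem.Str.startswith l "#### " then
      ⟨st2.1, st2.2.1, st2.2.2, .h4 l b⟩
    else ⟨st2.1, st2.2.1, st2.2.2, .drop⟩

def pvFinishA (st2 : List String × Option String × Bool) : List String :=
  pvFlush st2.1 st2.2.1 st2.2.2

def pvFinishB (st : PVSt) : List String :=
  let st := pvCloseH4 st
  pvFlush st.out st.pending st.h3

lemma pv_sw_nil_1 : PySem.Chars.startswith ([] : List Char) ['#', '#', ' '] = false := by decide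
lemma pv_sw_nil_2 : PySem.Chars.startswith ([] : List Char) ['#', '#', '#', ' '] = false := by decide
lemma pv_sw_nil_3 : PySem.Chars.startswith ([] : List Char) ['#', '#', '#', '#', ' '] = false := by decide

lemma pv_d23 (cs : List Char) (h2 : PySem.Chars.startswith cs ['#', '#', ' '] = true) :
    PySem.Chars.startswith cs ['#', '#', '#', ' '] = false := by
  by_contra hc
  rw [Bool.not_eq_false] at hc
  obtain ⟨t1, e1⟩ := (PySem.Chars.startswith_iff _ _).mp h2
  obtain ⟨t2, e2⟩ := (PySem.Chars.startswith_iff _ _).mp hc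
  rw [← e1] at e2
  simp at e2

lemma pv_head_ne_empty (l : String)
    (hl : (PySem.Str.startswith l "## " || PySem.Str.startswith l "### "
        || PySem.Str.startswith l "#### ") = true) : l ≠ "" := by
  rintro rfl; revert hl; decide

lemma pv_p1_eq (ls : List String) : ∀ (secs : List (String × List String))
    (h : Option String) (b : List String),
    (ls.foldl pvP1Step (secs, h, b)).1
      ++ [((ls.foldl pvP1Step (secs, h, b)).2.1.getD "", (ls.foldl pvP1Step (secs, h, b)).2.2)]
    = secs ++ pvSections ls h b := by
  induction ls with
  | nil => intro secs h b; simp [pvSections]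
  | cons l ls ih =>
    intro secs h b
    by_cases hl : (PySem.Str.startswith l "## " || PySem.Str.startswith l "### "
        || PySem.Str.startswith l "#### ") = true
    · by_cases hg : (h.isSome || !b.isEmpty) = true
      · simp only [List.foldl_cons, pvP1Step, hl, if_true, hg, pvSections]
        rw [ih]
        simp
      · simp only [List.foldl_cons, pvP1Step, hl, if_true, hg, if_false, pvSections,
          Bool.false_eq_true]
        rw [ih]
        simp
    · simp only [List.foldl_cons, pvP1Step, hl, if_false, pvSections, Bool.false_eq_true]
      rw [ih]

lemma pv_p2step_nil (st2 : List String × Option String × Bool) :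
    pvP2Step st2 ("", []) = st2 := by
  obtain ⟨res, p, h3⟩ := st2
  simp [pvP2Step, pv_sw_nil_1, pv_sw_nil_2, pv_sw_nil_3]

-- closing B's h4 buffer from the corresponding state is exactly A's step on the open section
lemma pv_close_corr (h : Option String) (b : List String)
    (st2 : List String × Option String × Bool) (hh : h ≠ some "") :
    pvCloseH4 (pvCorr h b st2) =
      ⟨(pvP2Step st2 (h.getD "", b)).1, (pvP2Step st2 (h.getD "", b)).2.1,
       (pvP2Step st2 (h.getD "", b)).2.2, .drop⟩ := by
  obtain ⟨res, p, h3⟩ := st2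
  cases h with
  | none =>
    simp [pvCorr, pvCloseH4, pvP2Step, pv_sw_nil_1, pv_sw_nil_2, pv_sw_nil_3]
  | some l =>
    have hl : l ≠ "" := fun e => hh (by rw [e])
    by_cases c1 : PySem.Chars.startswith l.toList ['#', '#', ' '] = true
    · have c2 := pv_d23 l.toList c1
      simp [pvCorr, pvCloseH4, pvP2Step, c1, c2]
    · by_cases c2 : PySem.Chars.startswith l.toList ['#', '#', '#', ' '] = true
      · simp [pvCorr, pvCloseH4, pvP2Step, c1, c2]
      · by_cases c3 : PySem.Chars.startswith l.toList ['#', '#', '#', '#', ' '] = true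
        · by_cases hb : pvHasBullet b = true <;>
            simp [pvCorr, pvCloseH4, pvP2Step, c1, c2, c3, hb]
        · simp [pvCorr, pvCloseH4, pvP2Step, c1, c2, c3, hl]

lemma pv_close_close (st : PVSt) : pvCloseH4 (pvCloseH4 st) = pvCloseH4 st := by
  obtain ⟨o, p, h3, m⟩ := st
  cases m with
  | h4 hh bb => by_cases hb : pvHasBullet bb = true <;> simp [pvCloseH4, hb]
  | emit => simp [pvCloseH4]
  | drop => simp [pvCloseH4]

-- on a heading line, B's step factors through closing the h4 buffer first
lemma pv_bstep_close (st : PVSt) (l : String)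
    (hl : (PySem.Str.startswith l "## " || PySem.Str.startswith l "### "
        || PySem.Str.startswith l "#### ") = true) :
    pvBStep st l = pvBStep (pvCloseH4 st) l := by
  by_cases d1 : PySem.Chars.startswith l.toList ['#', '#', ' '] = true
  · simp [pvBStep, d1, pv_close_close]
  · by_cases d2 : PySem.Chars.startswith l.toList ['#', '#', '#', ' '] = true
    · simp [pvBStep, d1, d2, pv_close_close]
    · by_cases d3 : PySem.Chars.startswith l.toList ['#', '#', '#', '#', ' '] = true
      · simp [pvBStep, d1, d2, d3, pv_close_close]
      · simp [d1, d2, d3] at hl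

-- B's step on a heading line from a closed (drop-mode) state opens the matching new section
lemma pv_bstep_drop (l : String) (st2' : List String × Option String × Bool)
    (hl : (PySem.Str.startswith l "## " || PySem.Str.startswith l "### "
        || PySem.Str.startswith l "#### ") = true) :
    pvBStep ⟨st2'.1, st2'.2.1, st2'.2.2, .drop⟩ l = pvCorr (some l) [] st2' := by
  by_cases d1 : PySem.Chars.startswith l.toList ['#', '#', ' '] = true
  · simp [pvBStep, pvCorr, pvCloseH4, d1]
  · by_cases d2 : PySem.Chars.startswith l.toList ['#', '#', '#', ' '] = true
    · simp [pvBStep, pvCorr, pvCloseH4, d1, d2]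
    · by_cases d3 : PySem.Chars.startswith l.toList ['#', '#', '#', '#', ' '] = true
      · simp [pvBStep, pvCorr, pvCloseH4, d1, d2, d3]
      · simp [d1, d2, d3] at hl

lemma pv_finish_corr (h : Option String) (b : List String)
    (st2 : List String × Option String × Bool) (hh : h ≠ some "") :
    pvFinishB (pvCorr h b st2) = pvFinishA (pvP2Step st2 (h.getD "", b)) := by
  show pvFlush (pvCloseH4 (pvCorr h b st2)).out (pvCloseH4 (pvCorr h b st2)).pending
      (pvCloseH4 (pvCorr h b st2)).h3 = _
  rw [pv_close_corr h b st2 hh]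
  rfl

lemma pv_bstep_head (l : String) (h : Option String) (b : List String)
    (st2 : List String × Option String × Bool) (hh : h ≠ some "")
    (hl : (PySem.Str.startswith l "## " || PySem.Str.startswith l "### "
        || PySem.Str.startswith l "#### ") = true) :
    pvBStep (pvCorr h b st2) l = pvCorr (some l) [] (pvP2Step st2 (h.getD "", b)) := by
  rw [pv_bstep_close _ _ hl, pv_close_corr h b st2 hh, pv_bstep_drop _ _ hl]

lemma pv_bstep_nonhead (l : String) (h : Option String) (b : List String)
    (st2 : List String × Option String × Bool) (hh : h ≠ some "")
    (hl : (PySem.Str.startswith l "## " || PySem.Str.startswith l "### "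
        || PySem.Str.startswith l "#### ") = false) :
    pvBStep (pvCorr h b st2) l = pvCorr h (b ++ [l]) st2 := by
  obtain ⟨res, p, h3⟩ := st2
  have hd := hl
  simp only [Bool.or_eq_false_iff] at hd
  obtain ⟨⟨d1, d2⟩, d3⟩ := hd
  have d1' : PySem.Chars.startswith l.toList ['#', '#', ' '] = false := by simpa using d1
  have d2' : PySem.Chars.startswith l.toList ['#', '#', '#', ' '] = false := by simpa using d2
  have d3' : PySem.Chars.startswith l.toList ['#', '#', '#', '#', ' '] = false := by
    simpa using d3
  cases h with
  | none => simp [pvCorr, pvBStep, d1', d2', d3']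
  | some l' =>
    by_cases c1 : PySem.Chars.startswith l'.toList ['#', '#', ' '] = true
    · simp [pvCorr, pvBStep, c1, d1', d2', d3']
    · by_cases c2 : PySem.Chars.startswith l'.toList ['#', '#', '#', ' '] = true
      · simp [pvCorr, pvBStep, c1, c2, d1', d2', d3']
      · by_cases c3 : PySem.Chars.startswith l'.toList ['#', '#', '#', '#', ' '] = true
        · simp [pvCorr, pvBStep, c1, c2, c3, d1', d2', d3']
        · simp [pvCorr, pvBStep, c1, c2, c3, d1', d2', d3']

lemma pv_key (ls : List String) : ∀ (h : Option String) (b : List String)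
    (st2 : List String × Option String × Bool), h ≠ some "" →
    pvFinishB (ls.foldl pvBStep (pvCorr h b st2))
      = pvFinishA ((pvSections ls h b).foldl pvP2Step st2) := by
  induction ls with
  | nil =>
    intro h b st2 hh
    simpa [pvSections, pvFinishA] using pv_finish_corr h b st2 hh
  | cons l ls ih =>
    intro h b st2 hh
    by_cases hl : (PySem.Str.startswith l "## " || PySem.Str.startswith l "### "
        || PySem.Str.startswith l "#### ") = true
    · have hne : (some l : Option String) ≠ some "" := by
        simpa using pv_head_ne_empty l hl
      rw [List.foldl_cons, pv_bstep_head l h b st2 hh hl]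
      rw [ih (some l) [] (pvP2Step st2 (h.getD "", b)) hne]
      congr 1
      simp only [pvSections, hl, if_true]
      by_cases hg : (h.isSome || !b.isEmpty) = true
      · simp [hg]
      · have h1 : h = none := by cases h <;> simp_all
        have h2 : b = [] := by cases b <;> simp_all
        subst h1 h2
        simp [pv_p2step_nil]
    · rw [List.foldl_cons, pv_bstep_nonhead l h b st2 hh (by simpa using hl)]
      rw [ih h (b ++ [l]) st2 hh]
      congr 1
      simp only [pvSections]
      rw [if_neg (by simpa using hl)]

-- ===== VERDICT (by name: the statement is the Claim_ definition above) =====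
theorem remove_empty_sections_py_spec : Claim_equal_remove_empty_sections_py := by
  intro text _
  show PySem.Str.join "\n"
      (pvFinishA ((((pvLines text).foldl pvP1Step ([], none, [])).1
          ++ [(((pvLines text).foldl pvP1Step ([], none, [])).2.1.getD "",
               ((pvLines text).foldl pvP1Step ([], none, [])).2.2)]).foldl
            pvP2Step ([], none, false)))
    = PySem.Str.join "\n"
        (pvFinishB ((pvLines text).foldl pvBStep (pvCorr none [] ([], none, false))))
  rw [pv_p1_eq (pvLines text) [] none []]
  simp only [List.nil_append]
  rw [pv_key (pvLines text) none [] ([], none, false) (by simp)]
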